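-- pv_equiv track=rewrite | github.com/oh130/multimodal-search-engine | evaluation/baseline_a.py | build_popularity_indexes
-- ===== SOURCE A (Python) =====
-- from collections import Counter, defaultdict
--
-- def build_popularity_indexes(
--     history_by_user: dict[str, list[str]],
--     article_features: dict[str, dict[str, str]],
-- ) -> tuple[list[str], dict[str, list[str]], dict[str, list[str]], dict[str, list[str]]]:
--     global_counter: Counter[str] = Counter()
--     category_to_articles: dict[str, list[str]] = defaultdict(list)
--     main_category_to_articles: dict[str, list[str]] = defaultdict(list)
--     color_to_articles: dict[str, list[str]] = defaultdict(list)
--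
--     for article_ids in history_by_user.values():
--         for article_id in article_ids:
--             if article_id not in article_features:
--                 continue
--             global_counter[article_id] += 1
--
--     for article_id, feature in article_features.items():
--         category_to_articles[feature["category"]].append(article_id)
--         main_category_to_articles[feature["main_category"]].append(article_id)
--         color_to_articles[feature["color"]].append(article_id)
--
--     def sort_articles(article_ids: list[str]) -> list[str]:
--         return sorted(article_ids, key=lambda article_id: (-global_counter[article_id], article_id))
--
--     global_popular = sort_articles(list(article_features.keys()))
--     category_popular = {key: sort_articles(article_ids) for key, article_ids in category_to_articles.items()}
--     main_category_popular = {key: sort_articles(article_ids) for key, article_ids in main_category_to_articles.items()}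
--     color_popular = {key: sort_articles(article_ids) for key, article_ids in color_to_articles.items()}
--     return global_popular, category_popular, main_category_popular, color_popular
-- ===== SOURCE B (Python) =====
-- def build_popularity_indexes(history_by_user, article_features):
--     counts = {}
--     for ids in history_by_user.values():
--         for a in ids:
--             if a in article_features:
--                 counts[a] = counts.get(a, 0) + 1
--     global_popular = sorted(article_features, key=lambda a: (-counts.get(a, 0), a))
--
--     def index_by(field):
--         keys = dict.fromkeys(f[field] for f in article_features.values())
--         return {k: [a for a in global_popular if article_features[a][field] == k] for k in keys}
--
--     return (global_popular, index_by("category"),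
--             index_by("main_category"), index_by("color"))
-- ===== Notes on version B (the rewrite author's own statement) =====
-- stated objective: simpler
-- what changed: B sorts the article ids by (-count, id) ONCE globally and derives every per-category/main_category/color bucket as an order-preserving filter of that single sorted list (bucket keys registered via dict.fromkeys in feature-iteration order), instead of A's grouping into defaultdicts followed by a separate sort of every bucket; counting uses a plain dict instead of Counter.
import Mathlib
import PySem

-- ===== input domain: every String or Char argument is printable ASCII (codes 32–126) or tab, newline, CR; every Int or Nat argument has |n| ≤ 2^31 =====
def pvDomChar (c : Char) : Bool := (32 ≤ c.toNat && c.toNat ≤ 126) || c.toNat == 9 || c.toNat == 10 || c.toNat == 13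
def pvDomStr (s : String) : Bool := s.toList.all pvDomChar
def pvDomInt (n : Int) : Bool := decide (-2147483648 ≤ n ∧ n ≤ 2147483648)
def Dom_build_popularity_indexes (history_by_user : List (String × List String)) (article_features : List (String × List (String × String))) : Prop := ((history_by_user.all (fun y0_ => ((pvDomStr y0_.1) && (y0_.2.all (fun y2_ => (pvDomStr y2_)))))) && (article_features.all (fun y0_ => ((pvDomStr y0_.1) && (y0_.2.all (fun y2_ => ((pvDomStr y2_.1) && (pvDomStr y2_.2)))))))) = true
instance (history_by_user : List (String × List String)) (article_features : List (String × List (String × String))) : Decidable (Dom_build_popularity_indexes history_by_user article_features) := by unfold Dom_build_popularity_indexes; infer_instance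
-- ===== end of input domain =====

-- B replaces A's group-then-sort-each-bucket scheme by ONE global sort of the ids by (-count, id)
-- followed by order-preserving filters per bucket key (objective: simpler; same return values).


-- ===== PORT A =====
-- feature[k]: first-match lookup; Pre_ guarantees the key is present (Python raises KeyError otherwise)
def pvFeatGet (f : List (String × String)) (k : String) : String :=
  ((PySem.Dict.mk f).get? k).getD ""

def build_popularity_indexes (history_by_user : List (String × List String)) (article_features : List (String × List (String × String))) : List String × (List (String × List String)) × (List (String × List String)) × (List (String × List String)) :=
  let featDict := PySem.Dict.mk article_features
  -- for article_ids in history_by_user.values(): for article_id in article_ids: if … continue; Counter += 1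
  let global_counter : PySem.Dict String Int :=
    history_by_user.foldl (fun c u =>
      u.2.foldl (fun c aid =>
        if featDict.contains aid then c.modify aid 0 (· + 1) else c) c)
      PySem.Dict.empty
  -- for article_id, feature in article_features.items(): defaultdict appends
  let category_to_articles : PySem.Dict String (List String) :=
    article_features.foldl (fun d p => d.modify (pvFeatGet p.2 "category") [] (· ++ [p.1])) PySem.Dict.empty
  let main_category_to_articles : PySem.Dict String (List String) :=
    article_features.foldl (fun d p => d.modify (pvFeatGet p.2 "main_category") [] (· ++ [p.1])) PySem.Dict.empty
  let color_to_articles : PySem.Dict String (List String) :=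
    article_features.foldl (fun d p => d.modify (pvFeatGet p.2 "color") [] (· ++ [p.1])) PySem.Dict.empty
  -- sorted(ids, key=lambda a: (-global_counter[a], a))
  let sort_articles : List String → List String := fun ids =>
    PySem.List.sorted2 ids (fun aid => -(global_counter.getD aid 0)) (fun aid => aid)
  let global_popular := sort_articles featDict.keys
  let category_popular := PySem.Dict.ofList (category_to_articles.items.map (fun kv => (kv.1, sort_articles kv.2)))
  let main_category_popular := PySem.Dict.ofList (main_category_to_articles.items.map (fun kv => (kv.1, sort_articles kv.2)))
  let color_popular := PySem.Dict.ofList (color_to_articles.items.map (fun kv => (kv.1, sort_articles kv.2)))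
  (global_popular, category_popular.items, main_category_popular.items, color_popular.items)

-- ===== PORT B =====
def build_popularity_indexes_alt (history_by_user : List (String × List String)) (article_features : List (String × List (String × String))) : List String × (List (String × List String)) × (List (String × List String)) × (List (String × List String)) :=
  let featDict := PySem.Dict.mk article_features
  -- counts[a] = counts.get(a, 0) + 1 over all history values, skipping unknown ids
  let counts : PySem.Dict String Int :=
    history_by_user.foldl (fun c u =>
      u.2.foldl (fun c a =>
        if featDict.contains a then c.insert a (c.getD a 0 + 1) else c) c)
      PySem.Dict.empty
  -- one global sort: sorted(article_features, key=lambda a: (-counts.get(a, 0), a))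
  let global_popular :=
    PySem.List.sorted2 featDict.keys (fun a => -(counts.getD a 0)) (fun a => a)
  -- index_by(field): dict.fromkeys registers the keys, each bucket is a filter of global_popular
  let index_by : String → List (String × List String) := fun field =>
    let keys := PySem.List.dedup (article_features.map (fun p => pvFeatGet p.2 field))
    (PySem.Dict.ofList (keys.map (fun k =>
      (k, global_popular.filter (fun a => pvFeatGet (featDict.getD a []) field == k))))).items
  (global_popular, index_by "category", index_by "main_category", index_by "color")

-- ===== PRECONDITION & SPEC =====
-- Pre_ excludes (i) association lists with duplicate dict keys (outer dicts and each feature dict) —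
-- those do not arise from the Python dict arguments — and (ii) features missing one of the keys
-- "category"/"main_category"/"color", on which the Python A raises KeyError.
def Pre_build_popularity_indexes (history_by_user : List (String × List String)) (article_features : List (String × List (String × String))) : Prop :=
  (history_by_user.map Prod.fst).Nodup ∧
  (article_features.map Prod.fst).Nodup ∧
  ∀ p ∈ article_features, (p.2.map Prod.fst).Nodup ∧
    "category" ∈ p.2.map Prod.fst ∧ "main_category" ∈ p.2.map Prod.fst ∧ "color" ∈ p.2.map Prod.fst
instance (history_by_user : List (String × List String)) (article_features : List (String × List (String × String))) : Decidable (Pre_build_popularity_indexes history_by_user article_features) := by unfold Pre_build_popularity_indexes; infer_instance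

def pvWitness_build_popularity_indexes : (List (String × List String)) × (List (String × List (String × String))) :=
  ([("u", ["x", "y", "x", "z"])],
   [("x", [("category", "c1"), ("main_category", "m1"), ("color", "red")]),
    ("y", [("category", "c1"), ("main_category", "m2"), ("color", "blue")])])

def Spec_build_popularity_indexes (history_by_user : List (String × List String)) (article_features : List (String × List (String × String))) (out : List String × (List (String × List String)) × (List (String × List String)) × (List (String × List String))) : Prop := out = build_popularity_indexes_alt history_by_user article_features
instance (history_by_user : List (String × List String)) (article_features : List (String × List (String × String))) (out : List String × (List (String × List String)) × (List (String × List String)) × (List (String × List String))) : Decidable (Spec_build_popularity_indexes history_by_user article_features out) := by unfold Spec_build_popularity_indexes; infer_instance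

-- ===== CLAIM (what is proved, stated in full; the proofs are below) =====
def Claim_equal_build_popularity_indexes : Prop := ∀ (history_by_user : List (String × List String)) (article_features : List (String × List (String × String))), Dom_build_popularity_indexes history_by_user article_features → Pre_build_popularity_indexes history_by_user article_features → Spec_build_popularity_indexes history_by_user article_features (build_popularity_indexes history_by_user article_features)

-- ===== LEMMAS AND PROOFS =====

theorem pv_sorted2_eq_sorted_lex {α κ₁ κ₂ : Type} [LinearOrder κ₁] [LinearOrder κ₂]
    (xs : List α) (k1 : α → κ₁) (k2 : α → κ₂) :
    PySem.List.sorted2 xs k1 k2 = PySem.List.sorted xs (fun a => toLex (k1 a, k2 a)) := by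
  unfold PySem.List.sorted2 PySem.List.sorted
  simp only []
  congr 1
  funext acc x
  congr 1
  funext a b
  rcases lt_trichotomy (k1 a) (k1 b) with h | h | h
  · simp [h, Prod.Lex.lt_iff, not_lt.mpr h.le]
  · simp [h, Prod.Lex.lt_iff]
  · simp [not_lt.mpr h.le, Prod.Lex.lt_iff, h.ne']
    exact fun hle => absurd hle (not_le.mpr h)

theorem pv_counts_eq (featDict : PySem.Dict String (List (String × String)))
    (h : List (String × List String)) (cA cB : PySem.Dict String Int)
    (hc : ∀ k, cA.getD k 0 = cB.getD k 0) :
    ∀ k, (h.foldl (fun c u => u.2.foldl (fun c aid =>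
            if featDict.contains aid then c.modify aid 0 (· + 1) else c) c) cA).getD k 0
        = (h.foldl (fun c u => u.2.foldl (fun c a =>
            if featDict.contains a then c.insert a (c.getD a 0 + 1) else c) c) cB).getD k 0 := by
  induction h generalizing cA cB with
  | nil => exact hc
  | cons u t ih =>
    simp only [List.foldl_cons]
    apply ih
    intro k
    rw [← List.foldl_filter, ← List.foldl_filter,
        PySem.Dict.getD_foldl_modify_add_one, PySem.Dict.getD_foldl_insert_add_one, hc]

theorem pv_map_fst_filter {β : Type} (pairs : List (String × β)) (dflt : β)
    (hn : (pairs.map Prod.fst).Nodup) (q : β → Bool) :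
    (pairs.map Prod.fst).filter (fun a => q ((PySem.Dict.mk pairs).getD a dflt))
      = (pairs.filter (fun pr => q pr.2)).map Prod.fst := by
  induction pairs with
  | nil => simp
  | cons p t ih =>
    obtain ⟨k0, v0⟩ := p
    simp only [List.map_cons, List.nodup_cons] at hn ⊢
    rw [List.filter_cons, List.filter_cons]
    have hhead : ((PySem.Dict.mk ((k0, v0) :: t)).getD k0 dflt) = v0 := by
      simp [PySem.Dict.getD, PySem.Dict.get?_mk_cons]
    have htail : (t.map Prod.fst).filter (fun a => q ((PySem.Dict.mk ((k0, v0) :: t)).getD a dflt))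
        = (t.map Prod.fst).filter (fun a => q ((PySem.Dict.mk t).getD a dflt)) := by
      apply List.filter_congr
      intro a ha
      have hne : (k0 == a) = false := by
        simp only [beq_eq_false_iff_ne, ne_eq]
        rintro rfl; exact hn.1 ha
      simp [PySem.Dict.getD, PySem.Dict.get?_mk_cons, hne]
    rw [hhead, htail, ih hn.2]
    cases hq : q v0 <;> simp

theorem pv_sort_bucket_eq_filter_global (pairs : List (String × List (String × String)))
    (hn : (pairs.map Prod.fst).Nodup) (cnt : String → Int) (q : List (String × String) → Bool) :
    PySem.List.sorted2 ((pairs.filter (fun pr => q pr.2)).map Prod.fst)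
        (fun aid => -(cnt aid)) (fun aid => aid)
      = (PySem.List.sorted2 (pairs.map Prod.fst) (fun a => -(cnt a)) (fun a => a)).filter
          (fun a => q ((PySem.Dict.mk pairs).getD a [])) := by
  rw [pv_sorted2_eq_sorted_lex, pv_sorted2_eq_sorted_lex]
  set key := fun a : String => toLex (-(cnt a), a) with hkey
  set p := fun a : String => q ((PySem.Dict.mk pairs).getD a []) with hp
  have hperm : (PySem.List.sorted (pairs.map Prod.fst) key).Perm (pairs.map Prod.fst) :=
    PySem.List.sorted_perm _ _ _
  apply PySem.List.sorted_eq_of_perm_of_pairwise_lt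
  · have h2 := hperm.filter p
    rw [pv_map_fst_filter pairs [] hn q] at h2
    exact h2
  · have hle := PySem.List.sorted_pairwise (pairs.map Prod.fst) key
    have hnd : (PySem.List.sorted (pairs.map Prod.fst) key).Nodup :=
      hperm.nodup_iff.mpr hn
    have hlt : (PySem.List.sorted (pairs.map Prod.fst) key).Pairwise
        (fun a b => key a < key b) := by
      refine (hle.and hnd).imp ?_
      rintro a b ⟨h1, h2⟩
      refine lt_of_le_of_ne h1 (fun he => h2 ?_)
      exact congrArg (fun x => (ofLex x).2) he
    exact hlt.sublist List.filter_sublist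

theorem pv_items_ofList {ν : Type} (l : List (String × ν)) (hl : (l.map Prod.fst).Nodup) :
    (PySem.Dict.ofList l).items = l := by
  unfold PySem.Dict.ofList PySem.Dict.update
  rw [PySem.Dict.items_foldl_insert_fresh l Prod.fst Prod.snd PySem.Dict.empty
      (by simp [PySem.Dict.contains_empty]) hl]
  simp [PySem.Dict.empty]

theorem pv_index_eq (af : List (String × List (String × String)))
    (hn : (af.map Prod.fst).Nodup) (cnt : String → Int) (field : String) :
    (PySem.Dict.ofList (((af.foldl (fun d p => d.modify (pvFeatGet p.2 field) [] (· ++ [p.1]))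
          PySem.Dict.empty).items).map
        (fun kv => (kv.1, PySem.List.sorted2 kv.2 (fun aid => -(cnt aid)) (fun aid => aid))))).items
    = (PySem.Dict.ofList ((PySem.List.dedup (af.map (fun p => pvFeatGet p.2 field))).map (fun k =>
        (k, (PySem.List.sorted2 (af.map Prod.fst) (fun a => -(cnt a)) (fun a => a)).filter
              (fun a => pvFeatGet ((PySem.Dict.mk af).getD a []) field == k))))).items := by
  have hkeysnd : (PySem.Set.ofList (af.map (fun p => pvFeatGet p.2 field))).Nodup :=
    PySem.Set.nodup_ofList _
  -- characterize A's grouping dict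
  set dA := af.foldl (fun d p => d.modify (pvFeatGet p.2 field) [] (· ++ [p.1])) PySem.Dict.empty with hdA
  have hkeys : dA.keys = PySem.Set.ofList (af.map (fun p => pvFeatGet p.2 field)) := by
    rw [hdA, PySem.Dict.keys_foldl_modify_key af (fun p => pvFeatGet p.2 field) []
          (fun _ p => (· ++ [p.1])) PySem.Dict.empty,
        PySem.Dict.keys_empty, PySem.Set.ofList_eq_foldl]
    rfl
  have hgetD : ∀ k, dA.getD k [] = (af.filter (fun pr => pvFeatGet pr.2 field == k)).map Prod.fst := by
    intro k
    have h1 : dA = (af.map (fun p => (pvFeatGet p.2 field, p.1))).foldl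
        (fun d q => d.modify q.1 [] (· ++ [q.2])) PySem.Dict.empty := by
      rw [hdA, List.foldl_map]
    rw [h1, PySem.Dict.getD_foldl_modify_append]
    simp [List.filter_map, Function.comp_def, List.map_map, PySem.Dict.getD_empty]
  have hitems : dA.items = (PySem.Set.ofList (af.map (fun p => pvFeatGet p.2 field))).map
      (fun k => (k, (af.filter (fun pr => pvFeatGet pr.2 field == k)).map Prod.fst)) := by
    rw [PySem.Dict.items_eq_map_keys dA (hkeys ▸ hkeysnd) [], hkeys]
    exact List.map_congr_left (fun k _ => by rw [hgetD k])
  rw [hitems]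
  rw [pv_items_ofList _ (by simp only [List.map_map, Function.comp_def, List.map_id']; exact hkeysnd),
      pv_items_ofList _ (by simp only [PySem.List.dedup, List.map_map, Function.comp_def, List.map_id']; exact hkeysnd)]
  rw [List.map_map, PySem.List.dedup]
  exact List.map_congr_left (fun k _ => by
    simp only [Function.comp_def]
    rw [pv_sort_bucket_eq_filter_global af hn cnt (fun f => pvFeatGet f field == k)])

theorem main_thm (h : List (String × List String)) (af : List (String × List (String × String)))
    (hn : (af.map Prod.fst).Nodup) :
    build_popularity_indexes h af = build_popularity_indexes_alt h af := by
  unfold build_popularity_indexes build_popularity_indexes_alt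
  simp only [PySem.Dict.keys_mk]
  have hcnt : (fun a => -((h.foldl (fun c u => u.2.foldl (fun c a =>
        if (PySem.Dict.mk af).contains a then c.insert a (c.getD a 0 + 1) else c) c)
        PySem.Dict.empty).getD a 0))
      = (fun a => -((h.foldl (fun c u => u.2.foldl (fun c aid =>
        if (PySem.Dict.mk af).contains aid then c.modify aid 0 (· + 1) else c) c)
        PySem.Dict.empty).getD a 0)) := by
    funext a
    rw [pv_counts_eq (PySem.Dict.mk af) h _ _ (fun _ => rfl) a]
  rw [hcnt]
  refine Prod.ext rfl (Prod.ext ?_ (Prod.ext ?_ ?_)) <;>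
    exact pv_index_eq af hn _ _

-- ===== VERDICT (by name: the statement is the Claim_ definition above) =====
theorem build_popularity_indexes_spec : Claim_equal_build_popularity_indexes := by
  intro h af _ hpre
  unfold Spec_build_popularity_indexes
  exact main_thm h af hpre.2.1
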